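-- pv_equiv track=rewrite | github.com/awaa-col/Surper_GCG | experiments/exp_18_l17_vector_quantification.py | flatten_prompt_groups_with_topics
-- ===== SOURCE A (Python) =====
-- from typing import Dict, Iterable, List, Sequence
--
-- def flatten_prompt_groups_with_topics(
--     prompt_groups: Dict[str, Dict[str, List[str]]],
--     group_name: str,
-- ) -> List[dict]:
--     rows: List[dict] = []
--     for topic in sorted(prompt_groups.keys()):
--         for prompt in prompt_groups[topic][group_name]:
--             rows.append({"topic": topic, "prompt": prompt})
--     return rows
-- ===== SOURCE B (Python) =====
-- def flatten_prompt_groups_with_topics(prompt_groups, group_name):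
--     pending = dict(prompt_groups)
--     rows = []
--     while pending:
--         topic = min(pending)
--         rows += [{"topic": topic, "prompt": p} for p in pending.pop(topic)[group_name]]
--     return rows
-- ===== Notes on version B (the rewrite author's own statement) =====
-- stated objective: alternative
-- what changed: B replaces A's sort-the-keys-then-nested-loop with an iterative selection loop: it repeatedly takes the minimum remaining topic via min(), pops that group from a working dict and extends the flat row list, so no sort routine is ever called.
import Mathlib
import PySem

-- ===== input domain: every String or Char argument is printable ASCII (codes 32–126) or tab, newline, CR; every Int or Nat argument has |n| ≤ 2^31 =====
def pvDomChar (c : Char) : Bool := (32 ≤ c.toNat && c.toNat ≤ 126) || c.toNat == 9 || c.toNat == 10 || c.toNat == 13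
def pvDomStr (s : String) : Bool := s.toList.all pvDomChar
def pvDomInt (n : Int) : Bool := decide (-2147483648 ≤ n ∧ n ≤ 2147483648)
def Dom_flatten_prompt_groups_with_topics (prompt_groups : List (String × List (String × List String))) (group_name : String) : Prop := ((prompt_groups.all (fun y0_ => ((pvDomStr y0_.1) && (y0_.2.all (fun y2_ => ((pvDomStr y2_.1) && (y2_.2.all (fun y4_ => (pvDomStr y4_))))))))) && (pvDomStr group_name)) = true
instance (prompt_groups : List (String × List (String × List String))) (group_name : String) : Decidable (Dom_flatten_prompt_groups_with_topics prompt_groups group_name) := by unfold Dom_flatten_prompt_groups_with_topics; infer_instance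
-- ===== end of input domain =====

-- B replaces A's sort-the-keys-then-nested-loop with an iterative selection loop (repeatedly pop
-- the minimum remaining topic from a working dict); no sort routine is called (objective: alternative).

-- ===== PORT A =====
-- rows = []; for topic in sorted(prompt_groups.keys()): for prompt in prompt_groups[topic][group_name]: rows.append({...}); return rows
def flatten_prompt_groups_with_topics (prompt_groups : List (String × List (String × List String))) (group_name : String) : List (List (String × String)) :=
  (PySem.List.sorted ((PySem.Dict.mk prompt_groups).keys) (fun k => k)).foldl
    (fun rows topic =>
      match (PySem.Dict.mk prompt_groups).get? topic with
      | some grp =>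
        match (PySem.Dict.mk grp).get? group_name with
        | some prompts =>
          prompts.foldl (fun rows prompt => rows ++ [[("topic", topic), ("prompt", prompt)]]) rows
        | none => rows   -- KeyError in Python: excluded by Pre_
      | none => rows     -- unreachable for a dict's own key
    ) []

-- ===== PORT B =====
-- termination helper for the while loop: a successful pop strictly shrinks the dict
theorem pv_pop_length {κ ν : Type} [BEq κ] (d : PySem.Dict κ ν) (k : κ) (v : ν)
    (rest : PySem.Dict κ ν) (h : d.pop? k = some (v, rest)) :
    rest.items.length < d.items.length := by
  unfold PySem.Dict.pop? at h
  cases hg : d.get? k with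
  | none => simp [hg] at h
  | some w =>
    simp only [hg, Option.map_some, Option.some.injEq, Prod.mk.injEq] at h
    obtain ⟨-, hrest⟩ := h
    unfold PySem.Dict.get? at hg
    cases hf : List.find? (fun p => p.1 == k) d.items with
    | none => simp [hf] at hg
    | some p =>
      have hpmem := List.mem_of_find?_eq_some hf
      have hpk := List.find?_some hf
      subst hrest
      show (d.items.filter _).length < d.items.length
      exact List.length_filter_lt_length_iff_exists.mpr ⟨p, hpmem, by simp [hpk]⟩

-- pending = dict(prompt_groups); rows = []
-- while pending: topic = min(pending); rows += [{...} for p in pending.pop(topic)[group_name]]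
-- return rows
def pvAltLoop (group_name : String) (pending : PySem.Dict String (List (String × List String)))
    (rows : List (List (String × String))) : List (List (String × String)) :=
  match PySem.List.min? pending.keys (fun k => k) with
  | none => rows                                   -- while pending: — empty, stop
  | some topic =>
    match hpop : pending.pop? topic with
    | some (grp, rest) =>
      pvAltLoop group_name rest
        (rows ++ (match (PySem.Dict.mk grp).get? group_name with
                  | some prompts => prompts.map (fun p => [("topic", topic), ("prompt", p)])
                  | none => []))                   -- KeyError in Python: excluded by Pre_
    | none => rows                                 -- unreachable: topic is a key of pending
termination_by pending.items.length
decreasing_by exact pv_pop_length pending topic grp rest hpop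

def flatten_prompt_groups_with_topics_alt (prompt_groups : List (String × List (String × List String))) (group_name : String) : List (List (String × String)) :=
  pvAltLoop group_name (PySem.Dict.ofList prompt_groups) []

-- ===== PRECONDITION & SPEC =====
-- Pre_ excludes (a) assoc lists with duplicate keys, which do not represent a Python dict at all
-- (the outer argument and each inner group are dicts), and (b) inputs where some group lacks
-- group_name, on which A raises KeyError.
def Pre_flatten_prompt_groups_with_topics (prompt_groups : List (String × List (String × List String))) (group_name : String) : Prop :=
  (prompt_groups.map Prod.fst).Nodup ∧
  ∀ p ∈ prompt_groups, (p.2.map Prod.fst).Nodup ∧ ((PySem.Dict.mk p.2).get? group_name).isSome = true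
instance (prompt_groups : List (String × List (String × List String))) (group_name : String) : Decidable (Pre_flatten_prompt_groups_with_topics prompt_groups group_name) := by unfold Pre_flatten_prompt_groups_with_topics; infer_instance

def pvWitness_flatten_prompt_groups_with_topics : (List (String × List (String × List String))) × String :=
  ([("t", [("g", ["p1", "p2"])]), ("a", [("g", ["q"]), ("h", [])])], "g")

def Spec_flatten_prompt_groups_with_topics (prompt_groups : List (String × List (String × List String))) (group_name : String) (out : List (List (String × String))) : Prop := out = flatten_prompt_groups_with_topics_alt prompt_groups group_name
instance (prompt_groups : List (String × List (String × List String))) (group_name : String) (out : List (List (String × String))) : Decidable (Spec_flatten_prompt_groups_with_topics prompt_groups group_name out) := by unfold Spec_flatten_prompt_groups_with_topics; infer_instance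

-- ===== CLAIM (what is proved, stated in full; the proofs are below) =====
def Claim_equal_flatten_prompt_groups_with_topics : Prop := ∀ (prompt_groups : List (String × List (String × List String))) (group_name : String), Dom_flatten_prompt_groups_with_topics prompt_groups group_name → Pre_flatten_prompt_groups_with_topics prompt_groups group_name → Spec_flatten_prompt_groups_with_topics prompt_groups group_name (flatten_prompt_groups_with_topics prompt_groups group_name)

-- ===== LEMMAS AND PROOFS =====

-- insertBy only looks at keys, so it commutes with map.
theorem pv_insertBy_map {α β κ : Type} [LT κ] [DecidableLT κ] (key : β → κ) (f : α → β) (x : α) :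
    ∀ (L : List α),
      PySem.List.insertBy (fun a b => decide (key a < key b)) (f x) (L.map f)
        = (PySem.List.insertBy (fun a b => decide (key (f a) < key (f b))) x L).map f := by
  intro L
  induction L with
  | nil => simp [PySem.List.insertBy]
  | cons a L ih =>
    by_cases h : key (f x) < key (f a)
    · simp [PySem.List.insertBy, h]
    · simp [PySem.List.insertBy, h, ih]

-- sorted (xs ++ rs) continues the insertion sort of xs with rs.
theorem pv_sorted_append {α κ : Type} [LT κ] [DecidableLT κ] (key : α → κ) (xs rs : List α) :
    PySem.List.sorted (xs ++ rs) key
      = rs.foldl (fun acc x => PySem.List.insertBy (fun a b => decide (key a < key b)) x acc)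
          (PySem.List.sorted xs key) := by
  rw [PySem.List.sorted_eq_foldl_insertBy, PySem.List.sorted_eq_foldl_insertBy, List.foldl_append]

-- sorted commutes with map when the key is taken after the map.
theorem pv_sorted_map {α β κ : Type} [LT κ] [DecidableLT κ] (key : β → κ) (f : α → β) :
    ∀ (l : List α),
      PySem.List.sorted (l.map f) key = (PySem.List.sorted l (fun x => key (f x))).map f := by
  intro l
  induction l using List.reverseRecOn with
  | nil => simp [PySem.List.sorted]
  | append_singleton l b ih =>
    rw [List.map_append, List.map_singleton, pv_sorted_append key (l.map f) [f b],
        pv_sorted_append (fun x => key (f x)) l [b]]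
    simp [ih, pv_insertBy_map key f b]

-- the canonical row expansion of one group, used to rewrite both loops
def pvRowsOf (group_name : String) (p : String × List (String × List String)) : List (List (String × String)) :=
  ((PySem.Dict.mk p.2).getD group_name []).map (fun prompt => [("topic", p.1), ("prompt", prompt)])

theorem pv_A_eq (prompt_groups : List (String × List (String × List String))) (group_name : String)
    (hpre : Pre_flatten_prompt_groups_with_topics prompt_groups group_name) :
    flatten_prompt_groups_with_topics prompt_groups group_name
      = (PySem.List.sorted prompt_groups (fun p => p.1)).flatMap (pvRowsOf group_name) := by
  obtain ⟨hnd, hin⟩ := hpre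
  unfold flatten_prompt_groups_with_topics
  have hkeys : (PySem.Dict.mk prompt_groups).keys = prompt_groups.map Prod.fst := by
    simp [PySem.Dict.keys]
  rw [hkeys, pv_sorted_map (fun k => k) Prod.fst, List.foldl_map]
  refine Eq.trans (PySem.List.foldl_congr_mem _ _
      (fun rows p => rows ++ pvRowsOf group_name p) [] ?_)
    (PySem.List.foldl_append_eq_flatMap (pvRowsOf group_name) _ _)
  intro acc p hp
  have hpl : p ∈ prompt_groups := (PySem.List.mem_sorted _ _ _ _).mp hp
  have hget : (PySem.Dict.mk prompt_groups).get? p.1 = some p.2 :=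
    PySem.Dict.get?_of_mem_items _ (by simpa using hpl) (by simpa [PySem.Dict.keys] using hnd)
  rw [hget]
  obtain ⟨prompts, hps⟩ := Option.isSome_iff_exists.mp (hin p hpl).2
  simp only [hps]
  rw [PySem.List.foldl_append_singleton_eq_map]
  simp [pvRowsOf, PySem.Dict.getD, hps]

-- dict(prompt_groups) of an assoc list without duplicate keys keeps the items unchanged
theorem pv_ofList_eq_mk {κ ν : Type} [BEq κ] [LawfulBEq κ] (l : List (κ × ν))
    (h : (l.map Prod.fst).Nodup) : PySem.Dict.ofList l = PySem.Dict.mk l := by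
  apply PySem.Dict.ext
  show (PySem.Dict.empty.update l).items = l
  unfold PySem.Dict.update
  have := PySem.Dict.items_foldl_insert_fresh l Prod.fst Prod.snd PySem.Dict.empty
    (fun a _ => PySem.Dict.contains_empty _) h
  simpa using this

-- removing the unique element with key t is a permutation-preserving split
theorem pv_perm_select {β : Type} : ∀ (l : List (String × β)) (t : String) (g : β),
    (l.map Prod.fst).Nodup → (t, g) ∈ l →
    l.Perm ((t, g) :: l.filter (fun p => !(p.1 == t))) := by
  intro l
  induction l with
  | nil => intro t g _ h; simp at h
  | cons a l ih =>
    intro t g hnd hmem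
    simp only [List.map_cons, List.nodup_cons] at hnd
    rcases List.mem_cons.mp hmem with rfl | hmem'
    · have hl : l.filter (fun p => !(p.1 == t)) = l := by
        apply List.filter_eq_self.mpr
        intro p hp
        have : p.1 ≠ t := fun hc => hnd.1 (hc ▸ List.mem_map.mpr ⟨p, hp, rfl⟩)
        simp [this]
      simp [hl]
    · have hat : a.1 ≠ t := by
        intro hc
        exact hnd.1 (hc ▸ List.mem_map.mpr ⟨(t, g), hmem', rfl⟩)
      have hstep := ih t g hnd.2 hmem'
      have hfa : (a :: l).filter (fun p => !(p.1 == t)) = a :: l.filter (fun p => !(p.1 == t)) := by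
        simp [hat]
      rw [hfa]
      exact (hstep.cons a).trans (List.Perm.swap (t, g) a _)

-- with distinct keys, the stable sort starts with the unique minimum-key entry
theorem pv_sorted_select {β : Type} (l : List (String × β)) (t : String) (g : β)
    (hnd : (l.map Prod.fst).Nodup) (hmem : (t, g) ∈ l) (hmin : ∀ p ∈ l, t ≤ p.1) :
    PySem.List.sorted l (fun p => p.1)
      = (t, g) :: PySem.List.sorted (l.filter (fun p => !(p.1 == t))) (fun p => p.1) := by
  have hfsub : ((l.filter (fun p => !(p.1 == t))).map Prod.fst).Sublist (l.map Prod.fst) :=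
    (List.filter_sublist).map Prod.fst
  have hfnd : ((l.filter (fun p => !(p.1 == t))).map Prod.fst).Nodup := hnd.sublist hfsub
  apply PySem.List.sorted_eq_of_perm_of_pairwise_lt
  · exact ((PySem.List.sorted_perm _ _ _).cons (t, g)).trans (pv_perm_select l t g hnd hmem).symm
  · rw [List.pairwise_cons]
    constructor
    · intro q hq
      have hqf : q ∈ l.filter (fun p => !(p.1 == t)) := (PySem.List.mem_sorted _ _ _ _).mp hq
      have hql : q ∈ l := List.mem_of_mem_filter hqf
      have hqt : q.1 ≠ t := by
        have := List.of_mem_filter hqf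
        simpa using this
      exact lt_of_le_of_ne (hmin q hql) (Ne.symm hqt)
    · have hle := PySem.List.sorted_pairwise (l.filter (fun p => !(p.1 == t))) (fun p => p.1)
      have hperm : ((PySem.List.sorted (l.filter (fun p => !(p.1 == t))) (fun p => p.1)).map Prod.fst).Perm
          ((l.filter (fun p => !(p.1 == t))).map Prod.fst) :=
        (PySem.List.sorted_perm _ _ _).map Prod.fst
      have hsnd : ((PySem.List.sorted (l.filter (fun p => !(p.1 == t))) (fun p => p.1)).map Prod.fst).Nodup :=
        hperm.nodup_iff.mpr hfnd
      have hne : (PySem.List.sorted (l.filter (fun p => !(p.1 == t))) (fun p => p.1)).Pairwise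
          (fun a b => a.1 ≠ b.1) := (List.pairwise_map).mp hsnd
      exact (hle.and hne).imp (fun h => lt_of_le_of_ne h.1 h.2)

-- the selection loop over an assoc list with distinct keys is the sorted flatten
theorem pv_loop_eq (g : String) : ∀ (n : Nat) (items : List (String × List (String × List String)))
    (rows : List (List (String × String))), items.length ≤ n → (items.map Prod.fst).Nodup →
    pvAltLoop g (PySem.Dict.mk items) rows
      = rows ++ (PySem.List.sorted items (fun p => p.1)).flatMap (pvRowsOf g) := by
  intro n
  induction n with
  | zero =>
    intro items rows hlen _
    have : items = [] := List.eq_nil_of_length_eq_zero (Nat.le_zero.mp hlen)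
    subst this
    rw [pvAltLoop]
    simp [PySem.Dict.keys, PySem.List.min?, PySem.List.sorted]
  | succ n ih =>
    intro items rows hlen hnd
    cases hmin : PySem.List.min? (PySem.Dict.mk items).keys (fun k => k) with
    | none =>
      have hkeys : (PySem.Dict.mk items).keys = [] := (PySem.List.min?_eq_none_iff _ _).mp hmin
      have : items = [] := by simpa [PySem.Dict.keys] using hkeys
      subst this
      rw [pvAltLoop]
      simp [PySem.Dict.keys, PySem.List.min?, PySem.List.sorted]
    | some topic =>
      have htk : topic ∈ items.map Prod.fst := by
        have := PySem.List.min?_mem hmin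
        simpa [PySem.Dict.keys] using this
      obtain ⟨p, hp, hfst⟩ := List.mem_map.mp htk
      obtain ⟨grp, hpl⟩ : ∃ g, (topic, g) ∈ items := ⟨p.2, by rw [← hfst]; simpa using hp⟩
      have hget : (PySem.Dict.mk items).get? topic = some grp :=
        PySem.Dict.get?_of_mem_items _ (by simpa using hpl) (by simpa [PySem.Dict.keys] using hnd)
      have hpop : (PySem.Dict.mk items).pop? topic
          = some (grp, PySem.Dict.mk (items.filter (fun p => !(p.1 == topic)))) := by
        simp [PySem.Dict.pop?, hget, PySem.Dict.erase]
      have hmin' : ∀ p ∈ items, topic ≤ p.1 := by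
        intro q hq
        exact PySem.List.min?_isMin hmin q.1 (by simp [PySem.Dict.keys]; exact ⟨q.2, hq⟩)
      have hflen : (items.filter (fun p => !(p.1 == topic))).length ≤ n := by
        have hlt : (items.filter (fun p => !(p.1 == topic))).length < items.length :=
          List.length_filter_lt_length_iff_exists.mpr ⟨(topic, grp), hpl, by simp⟩
        omega
      have hfnd : ((items.filter (fun p => !(p.1 == topic))).map Prod.fst).Nodup :=
        hnd.sublist ((List.filter_sublist).map Prod.fst)
      rw [pvAltLoop, hmin]
      simp only [hpop]
      split
      case _ grp' rest' heq =>
        rw [hpop] at heq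
        simp only [Option.some.injEq, Prod.mk.injEq] at heq
        obtain ⟨rfl, rfl⟩ := heq
        rw [ih (items.filter (fun p => !(p.1 == topic))) _ hflen hfnd,
            pv_sorted_select items topic grp hnd hpl hmin']
        have hhead : (match (PySem.Dict.mk grp).get? g with
            | some prompts => prompts.map (fun p => [("topic", topic), ("prompt", p)])
            | none => ([] : List (List (String × String)))) = pvRowsOf g (topic, grp) := by
          cases h : (PySem.Dict.mk grp).get? g <;> simp [pvRowsOf, PySem.Dict.getD, h]
        rw [hhead]
        simp
      case _ heq =>
        rw [hpop] at heq
        simp at heq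

theorem pv_B_eq (prompt_groups : List (String × List (String × List String))) (group_name : String)
    (hnd : (prompt_groups.map Prod.fst).Nodup) :
    flatten_prompt_groups_with_topics_alt prompt_groups group_name
      = (PySem.List.sorted prompt_groups (fun p => p.1)).flatMap (pvRowsOf group_name) := by
  unfold flatten_prompt_groups_with_topics_alt
  rw [pv_ofList_eq_mk prompt_groups hnd,
      pv_loop_eq group_name prompt_groups.length prompt_groups [] le_rfl hnd]
  simp

-- ===== VERDICT (by name: the statement is the Claim_ definition above) =====
theorem flatten_prompt_groups_with_topics_spec : Claim_equal_flatten_prompt_groups_with_topics := by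
  intro prompt_groups group_name _ hpre
  unfold Spec_flatten_prompt_groups_with_topics
  rw [pv_A_eq prompt_groups group_name hpre, pv_B_eq prompt_groups group_name hpre.1]
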